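-- pv_equiv track=rewrite | github.com/pranavanmaru/code-samples | dataflow/JavaProjectsThatNeedHelp.py | packagesThatNeedHelp
-- ===== SOURCE A (Python) =====
-- def packagesThatNeedHelp(record):
--    count=0
--    package_name= u'EMPTY'
--    for line in record:
--       if line is None:
--          continue
--       if line.startswith('package'):
--          package_name=line
--       if 'FIXME' in line or 'TODO' in line:
--          count+=1
--    yield (package_name,count)
-- ===== SOURCE B (Python) =====
-- def packagesThatNeedHelp(record):
--     # Find the last package line by scanning backwards and stopping at the
--     # first hit (equivalent to tracking the last match in a forward pass).
--     package_name = u'EMPTY'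
--     for line in reversed(record):
--         if line is not None and line.startswith('package'):
--             package_name = line
--             break
--     count = 0
--     for line in record:
--         if line is not None and ('FIXME' in line or 'TODO' in line):
--             count += 1
--     yield (package_name, count)
-- ===== Notes on version B (the rewrite author's own statement) =====
-- stated objective: alternative
-- what changed: Instead of one forward fused loop with two pieces of mutable state, B finds the package name by a backward scan that stops at the first 'package'-prefixed line (first match from the end = A's last match), and counts FIXME/TODO lines in a separate forward pass.
import Mathlib
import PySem

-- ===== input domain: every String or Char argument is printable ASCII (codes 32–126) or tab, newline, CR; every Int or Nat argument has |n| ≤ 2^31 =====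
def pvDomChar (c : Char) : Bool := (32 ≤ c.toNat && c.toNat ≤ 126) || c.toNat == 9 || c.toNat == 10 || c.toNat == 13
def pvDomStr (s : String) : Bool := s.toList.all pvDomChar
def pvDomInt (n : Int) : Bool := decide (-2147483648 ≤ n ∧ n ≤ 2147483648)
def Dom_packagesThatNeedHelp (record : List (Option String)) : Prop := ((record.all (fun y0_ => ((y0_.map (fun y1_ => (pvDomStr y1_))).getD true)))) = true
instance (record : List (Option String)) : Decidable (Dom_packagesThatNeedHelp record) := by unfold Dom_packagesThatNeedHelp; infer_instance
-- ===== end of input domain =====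

-- B replaces A's single forward fused loop with a backward scan that stops at the first 'package'-prefixed line plus a separate forward counting pass; alternative decomposition, no speed claim.


-- ===== PORT A =====
def pvStepA (st : String × Int) (line : Option String) : String × Int :=
  match line with
  | none => st
  | some l =>
    let pkg := if PySem.Str.startswith l "package" then l else st.1
    let cnt := if PySem.Str.isIn "FIXME" l || PySem.Str.isIn "TODO" l then st.2 + 1 else st.2
    (pkg, cnt)

def packagesThatNeedHelp (record : List (Option String)) : List (String × Int) :=
  [record.foldl pvStepA ("EMPTY", 0)]

-- ===== PORT B =====
-- the backward loop with break: recursion over the reversed list, stopping at the first match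
def pvFindPkg : List (Option String) → String
  | [] => "EMPTY"
  | none :: rest => pvFindPkg rest
  | some l :: rest => if PySem.Str.startswith l "package" then l else pvFindPkg rest

def pvCntStep (c : Int) (line : Option String) : Int :=
  match line with
  | none => c
  | some l => if PySem.Str.isIn "FIXME" l || PySem.Str.isIn "TODO" l then c + 1 else c

def packagesThatNeedHelp_alt (record : List (Option String)) : List (String × Int) :=
  let package_name := pvFindPkg record.reverse
  let count := record.foldl pvCntStep (0 : Int)
  [(package_name, count)]

-- ===== PRECONDITION & SPEC =====
def Spec_packagesThatNeedHelp (record : List (Option String)) (out : List (String × Int)) : Prop := out = packagesThatNeedHelp_alt record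
instance (record : List (Option String)) (out : List (String × Int)) : Decidable (Spec_packagesThatNeedHelp record out) := by unfold Spec_packagesThatNeedHelp; infer_instance

-- ===== CLAIM (what is proved, stated in full; the proofs are below) =====
def Claim_equal_packagesThatNeedHelp : Prop := ∀ (record : List (Option String)), Dom_packagesThatNeedHelp record → Spec_packagesThatNeedHelp record (packagesThatNeedHelp record)

-- ===== LEMMAS AND PROOFS =====
-- backward search with an explicit default (generalisation of pvFindPkg for the induction)
def pvFindPkgD (p : String) : List (Option String) → String
  | [] => p
  | none :: rest => pvFindPkgD p rest
  | some l :: rest => if PySem.Str.startswith l "package" then l else pvFindPkgD p rest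

theorem pvFindPkg_eq_D (xs : List (Option String)) : pvFindPkg xs = pvFindPkgD "EMPTY" xs := by
  induction xs with
  | nil => rfl
  | cons hd tl ih => cases hd <;> simp [pvFindPkg, pvFindPkgD, ih]

theorem pvFindPkgD_append_singleton (xs : List (Option String)) (x : Option String) (p : String) :
    pvFindPkgD p (xs ++ [x]) =
      pvFindPkgD (match x with
        | none => p
        | some l => if PySem.Str.startswith l "package" then l else p) xs := by
  induction xs with
  | nil => cases x <;> simp [pvFindPkgD]
  | cons hd tl ih => cases hd <;> simp [pvFindPkgD, ih]

theorem pvLoopA (record : List (Option String)) (p : String) (c : Int) :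
    record.foldl pvStepA (p, c) =
      (pvFindPkgD p record.reverse, record.foldl pvCntStep c) := by
  induction record generalizing p c with
  | nil => rfl
  | cons hd tl ih =>
    cases hd with
    | none => simpa [pvStepA, pvCntStep, pvFindPkgD, List.reverse_cons, pvFindPkgD_append_singleton] using ih p c
    | some l =>
      simp only [List.foldl_cons, pvStepA, pvCntStep, List.reverse_cons, pvFindPkgD_append_singleton, ih]

-- ===== VERDICT (by name: the statement is the Claim_ definition above) =====
theorem packagesThatNeedHelp_spec : Claim_equal_packagesThatNeedHelp := by
  intro record _
  show _ = _
  simp [packagesThatNeedHelp, packagesThatNeedHelp_alt, pvLoopA, pvFindPkg_eq_D]
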